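-- pv_equiv track=rewrite | github.com/VenkatReddybathuni/Compilers | tests/project_euler_reference_tests.py | euler5
-- ===== SOURCE A (Python) =====
-- def euler5(limit):
--     """Smallest number divisible by all numbers from 1 to limit"""
--     def gcd(a, b):
--         while b:
--             a, b = b, a % b
--         return a
--
--     def lcm(a, b):
--         return a * b // gcd(a, b)
--
--     result = 1
--     for i in range(1, limit + 1):
--         result = lcm(result, i)
--     return result
-- ===== SOURCE B (Python) =====
-- def euler5(limit):
--     """Smallest number divisible by all numbers from 1 to limit"""
--     def is_prime(p):
--         if p < 2:
--             return False
--         d = 2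
--         while d * d <= p:
--             if p % d == 0:
--                 return False
--             d += 1
--         return True
--
--     result = 1
--     for p in range(2, limit + 1):
--         if is_prime(p):
--             pw = p
--             while pw * p <= limit:
--                 pw *= p
--             result *= pw
--     return result
-- ===== Notes on version B (the rewrite author's own statement) =====
-- stated objective: faster
-- what changed: Replaces the running lcm-accumulation (a gcd and an exact division against the huge accumulator for every i in 1..limit) by the number-theoretic closed form: lcm(1..n) is the product over primes p <= n of the largest power p^k <= n, found by trial-division primality and a small power loop.
import Mathlib
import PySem

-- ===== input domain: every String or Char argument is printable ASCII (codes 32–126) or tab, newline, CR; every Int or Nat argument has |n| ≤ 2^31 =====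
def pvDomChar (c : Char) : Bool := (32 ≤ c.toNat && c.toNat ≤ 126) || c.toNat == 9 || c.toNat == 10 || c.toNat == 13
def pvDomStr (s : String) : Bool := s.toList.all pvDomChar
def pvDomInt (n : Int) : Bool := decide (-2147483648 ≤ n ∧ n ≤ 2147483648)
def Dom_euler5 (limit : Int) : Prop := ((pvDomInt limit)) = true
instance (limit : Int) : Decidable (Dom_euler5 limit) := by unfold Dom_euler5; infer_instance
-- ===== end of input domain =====

-- B replaces A's running lcm-accumulation by the prime-power closed form
-- lcm(1..n) = ∏_{p prime ≤ n} p^⌊log_p n⌋, avoiding gcd/division on the huge accumulator.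

-- ===== PORT A =====

-- termination helper for the Python 'while b: a, b = b, a % b' loop
lemma pvModNatAbsLt (a b : Int) (hb : ¬ b = 0) :
    (PySem.Int.mod a b).natAbs < b.natAbs := by
  rcases (by omega : b < 0 ∨ 0 < b) with h | h
  · have h1 := (PySem.Int.mod_neg_bounds a h).1
    have h2 := (PySem.Int.mod_neg_bounds a h).2
    omega
  · have h1 := PySem.Int.mod_nonneg a h
    have h2 := PySem.Int.mod_lt a h
    omega

-- def gcd(a, b): while b: a, b = b, a % b ; return a
def euler5Gcd (a b : Int) : Int :=
  if hb : b = 0 then a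
  else euler5Gcd b (PySem.Int.mod a b)
termination_by b.natAbs
decreasing_by exact pvModNatAbsLt a b hb

-- def lcm(a, b): return a * b // gcd(a, b)
def euler5Lcm (a b : Int) : Int := PySem.Int.floordiv (a * b) (euler5Gcd a b)

def euler5 (limit : Int) : Int :=
  (PySem.List.pyRange 1 (limit + 1) 1).foldl (fun result i => euler5Lcm result i) 1

-- ===== PORT B =====

-- termination helper for the trial-division loop (d*d ≤ p → d ≤ p)
lemma pvSqLeImpLe {d p : Int} (h : d * d ≤ p) : d ≤ p := by
  rcases (by omega : d ≤ 0 ∨ 0 < d) with h0 | h0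
  · have := mul_self_nonneg d; omega
  · nlinarith

-- while d * d <= p: if p % d == 0: return False ; d += 1
def euler5IsPrimeLoop (p d : Int) : Bool :=
  if h : d * d ≤ p then
    if PySem.Int.mod p d = 0 then false
    else euler5IsPrimeLoop p (d + 1)
  else true
termination_by (p + 1 - d).toNat
decreasing_by have := pvSqLeImpLe h; omega

-- def is_prime(p): if p < 2: return False ; d = 2 ; <loop> ; return True
def euler5IsPrime (p : Int) : Bool :=
  if p < 2 then false else euler5IsPrimeLoop p 2

-- pw = p; while pw * p <= limit: pw *= p   (the '2 ≤ p ∧ 1 ≤ pw' conjuncts are a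
-- totality guard only: every call site has p prime and pw a positive power of p)
def euler5PowLoop (limit p pw : Int) : Int :=
  if h : 2 ≤ p ∧ 1 ≤ pw ∧ pw * p ≤ limit then euler5PowLoop limit p (pw * p)
  else pw
termination_by (limit - pw).toNat
decreasing_by
  obtain ⟨h2, h1, hle⟩ := h
  have : pw < pw * p := by nlinarith
  omega

def euler5_alt (limit : Int) : Int :=
  (PySem.List.pyRange 2 (limit + 1) 1).foldl
    (fun result p => if euler5IsPrime p then result * euler5PowLoop limit p p else result) 1

-- ===== PRECONDITION & SPEC =====
def Spec_euler5 (limit : Int) (out : Int) : Prop := out = euler5_alt limit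
instance (limit : Int) (out : Int) : Decidable (Spec_euler5 limit out) := by unfold Spec_euler5; infer_instance

-- ===== CLAIM (what is proved, stated in full; the proofs are below) =====
def Claim_equal_euler5 : Prop := ∀ (limit : Int), Dom_euler5 limit → Spec_euler5 limit (euler5 limit)

-- ===== LEMMAS AND PROOFS =====

-- ---- the common mathematical object: lcm(1..n) and its prime-power form ----

def euler5NatA (n : ℕ) : ℕ := (List.range' 1 n).foldl Nat.lcm 1

def euler5Prod (n : ℕ) : ℕ := ∏ p ∈ Nat.primesBelow (n + 1), p ^ Nat.log p n

lemma euler5NatA_succ (n : ℕ) : euler5NatA (n + 1) = Nat.lcm (euler5NatA n) (n + 1) := by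
  unfold euler5NatA
  rw [List.range'_concat, List.foldl_append]
  simp [Nat.add_comm]


lemma dvd_euler5NatA {m n : ℕ} (h1 : 0 < m) (h2 : m ≤ n) : m ∣ euler5NatA n := by
  induction n with
  | zero => omega
  | succ n ih =>
    rw [euler5NatA_succ]
    rcases Nat.lt_or_ge m (n + 1) with h | h
    · exact (ih (by omega)).trans (Nat.dvd_lcm_left _ _)
    · have : m = n + 1 := by omega
      subst this; exact Nat.dvd_lcm_right _ _

lemma dvd_euler5Prod {m n : ℕ} (h1 : 0 < m) (h2 : m ≤ n) : m ∣ euler5Prod n := by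
  have hm : m ≠ 0 := by omega
  have hn : n ≠ 0 := by omega
  have hrepr : (∏ p ∈ m.factorization.support, p ^ m.factorization p) = m := by
    simpa [Finsupp.prod] using Nat.prod_factorization_pow_eq_self hm
  have hsub : m.factorization.support ⊆ Nat.primesBelow (n + 1) := by
    intro p hp
    rw [Nat.support_factorization] at hp
    have hprime := Nat.prime_of_mem_primeFactors hp
    have hdvd := Nat.dvd_of_mem_primeFactors hp
    exact Nat.mem_primesBelow.mpr ⟨by have := Nat.le_of_dvd h1 hdvd; omega, hprime⟩
  calc m = ∏ p ∈ m.factorization.support, p ^ m.factorization p := hrepr.symm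
    _ ∣ ∏ p ∈ m.factorization.support, p ^ Nat.log p n := by
        apply Finset.prod_dvd_prod_of_dvd
        intro p hp
        apply pow_dvd_pow
        have hprime : p.Prime := by
          rw [Nat.support_factorization] at hp
          exact Nat.prime_of_mem_primeFactors hp
        have hle : p ^ m.factorization p ≤ n :=
          le_trans (Nat.le_of_dvd h1 (Nat.ordProj_dvd m p)) h2
        exact (Nat.le_log_iff_pow_le hprime.one_lt hn).mpr hle
    _ ∣ ∏ p ∈ Nat.primesBelow (n + 1), p ^ Nat.log p n :=
        Finset.prod_dvd_prod_of_subset _ _ _ hsub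

lemma euler5Prod_dvd_succ (n : ℕ) : euler5Prod n ∣ euler5Prod (n + 1) := by
  unfold euler5Prod
  calc (∏ p ∈ Nat.primesBelow (n + 1), p ^ Nat.log p n)
      ∣ ∏ p ∈ Nat.primesBelow (n + 1), p ^ Nat.log p (n + 1) := by
        apply Finset.prod_dvd_prod_of_dvd
        intro p _
        exact pow_dvd_pow p (Nat.log_mono_right (by omega))
    _ ∣ ∏ p ∈ Nat.primesBelow (n + 2), p ^ Nat.log p (n + 1) := by
        apply Finset.prod_dvd_prod_of_subset
        intro p hp
        rw [Nat.mem_primesBelow] at hp ⊢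
        exact ⟨by omega, hp.2⟩

lemma euler5NatA_dvd_Prod (n : ℕ) : euler5NatA n ∣ euler5Prod n := by
  induction n with
  | zero => simp [euler5NatA]
  | succ n ih =>
    rw [euler5NatA_succ]
    exact Nat.lcm_dvd ((ih).trans (euler5Prod_dvd_succ n))
      (dvd_euler5Prod (by omega) le_rfl)

lemma prod_primepow_dvd (s : Finset ℕ) (N : ℕ) (e : ℕ → ℕ)
    (hp : ∀ p ∈ s, p.Prime) (hd : ∀ p ∈ s, p ^ e p ∣ N) :
    (∏ p ∈ s, p ^ e p) ∣ N := by
  induction s using Finset.induction_on with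
  | empty => simp
  | insert a s has ih =>
    rw [Finset.prod_insert has]
    apply Nat.Coprime.mul_dvd_of_dvd_of_dvd
    · apply Nat.Coprime.pow_left
      apply Nat.Coprime.prod_right
      intro q hq
      apply Nat.Coprime.pow_right
      exact (Nat.coprime_primes (hp a (Finset.mem_insert_self a s))
        (hp q (Finset.mem_insert_of_mem hq))).mpr (fun h => has (h ▸ hq))
    · exact hd a (Finset.mem_insert_self a s)
    · exact ih (fun p hps => hp p (Finset.mem_insert_of_mem hps))
        (fun p hps => hd p (Finset.mem_insert_of_mem hps))

lemma euler5Prod_dvd_NatA (n : ℕ) : euler5Prod n ∣ euler5NatA n := by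
  rcases Nat.eq_zero_or_pos n with rfl | hn
  · simp [euler5Prod, Nat.primesBelow, euler5NatA]
  · apply prod_primepow_dvd
    · intro p hp; exact (Nat.mem_primesBelow.mp hp).2
    · intro p hp
      have hprime := (Nat.mem_primesBelow.mp hp).2
      apply dvd_euler5NatA (pow_pos hprime.pos _)
      exact Nat.pow_log_le_self p (by omega)

lemma euler5NatA_eq_Prod (n : ℕ) : euler5NatA n = euler5Prod n :=
  Nat.dvd_antisymm (euler5NatA_dvd_Prod n) (euler5Prod_dvd_NatA n)

-- ---- bridge for port A ----

lemma euler5Gcd_natCast (b a : ℕ) : euler5Gcd (a : Int) (b : Int) = (Nat.gcd b a : Int) := by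
  induction b using Nat.strong_induction_on generalizing a with
  | _ b ih =>
    rw [euler5Gcd]
    by_cases hb : (b : Int) = 0
    · have hb0 : b = 0 := by exact_mod_cast hb
      subst hb0; simp
    · have hbn : b ≠ 0 := fun h => hb (by exact_mod_cast h)
      rw [dif_neg hb, PySem.Int.mod_natCast a b, ih (a % b) (Nat.mod_lt a (by omega)) b]
      rw [Nat.gcd_rec b a]

lemma euler5Lcm_natCast (a b : ℕ) : euler5Lcm (a : Int) (b : Int) = (Nat.lcm a b : Int) := by
  unfold euler5Lcm
  rw [euler5Gcd_natCast]
  have h1 : ((a : Int) * b) = ((a * b : ℕ) : Int) := by push_cast; ring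
  rw [h1, PySem.Int.floordiv_natCast]
  rw [Nat.lcm, Nat.gcd_comm b a]

lemma euler5_foldA (l : List ℕ) : ∀ m : ℕ, 0 < m → (∀ x ∈ l, 0 < x) →
    (l.map (fun x : ℕ => (x : Int))).foldl (fun r i => euler5Lcm r i) (m : Int)
      = ((l.foldl Nat.lcm m : ℕ) : Int) := by
  induction l with
  | nil => intro m _ _; simp
  | cons x xs ih =>
    intro m hm hl
    simp only [List.map_cons, List.foldl_cons]
    rw [euler5Lcm_natCast m x]
    exact ih (Nat.lcm m x) (Nat.lcm_pos hm (hl x (by simp))) (fun y hy => hl y (by simp [hy]))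

lemma euler5_eq_natA (n : ℕ) : euler5 (n : Int) = (euler5NatA n : Int) := by
  unfold euler5 euler5NatA
  have hrange : PySem.List.pyRange 1 ((n : Int) + 1) 1
      = (List.range' 1 n).map (fun x : ℕ => (x : Int)) := by
    rw [PySem.List.pyRange_one, List.range'_eq_map_range, List.map_map]
    have h1 : ((n : Int) + 1 - 1).toNat = n := by omega
    rw [h1]
    apply List.map_congr_left
    intro k _
    simp
  rw [hrange]
  exact euler5_foldA (List.range' 1 n) 1 (by omega)
    (fun x hx => by have := List.mem_range'_1.mp hx; omega)

-- ---- bridge for port B ----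

lemma euler5IsPrimeLoop_eq (p : ℕ) (hp : 2 ≤ p) : ∀ k d : ℕ, 1 ≤ d → p + 1 - d ≤ k →
    (euler5IsPrimeLoop (p : Int) (d : Int) = true
      ↔ (∀ e : ℕ, d ≤ e → e * e ≤ p → ¬ e ∣ p)) := by
  intro k
  induction k with
  | zero =>
    intro d hd hk
    have hdp : p < d := by omega
    rw [euler5IsPrimeLoop]
    have hcond : ¬ ((d : Int) * d ≤ (p : Int)) := by
      intro h
      have : d * d ≤ p := by exact_mod_cast h
      nlinarith
    rw [dif_neg hcond]
    constructor
    · intro _ e he hee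
      exfalso
      have : d * d ≤ e * e := Nat.mul_le_mul he he
      nlinarith
    · intro _; rfl
  | succ k ih =>
    intro d hd hk
    rw [euler5IsPrimeLoop]
    by_cases hcond : d * d ≤ p
    · rw [dif_pos (by exact_mod_cast hcond)]
      rw [PySem.Int.mod_natCast p d]
      by_cases hdvd : d ∣ p
      · have hm0 : (p % d : ℕ) = 0 := Nat.dvd_iff_mod_eq_zero.mp hdvd
        rw [if_pos (by exact_mod_cast hm0)]
        constructor
        · intro h; exact absurd h (by simp)
        · intro hall; exact absurd hdvd (hall d le_rfl hcond)
      · have hmod : ((p % d : ℕ) : Int) ≠ 0 := by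
          intro h
          exact hdvd (Nat.dvd_iff_mod_eq_zero.mpr (by exact_mod_cast h))
        rw [if_neg hmod]
        have hdlep : d ≤ p := by nlinarith
        have hc1 : ((d : Int) + 1) = ((d + 1 : ℕ) : Int) := by push_cast; ring
        rw [hc1, ih (d + 1) (by omega) (by omega)]
        constructor
        · intro h e he hee
          rcases Nat.eq_or_lt_of_le he with rfl | hlt
          · exact fun hd' => hdvd hd'
          · exact h e (by omega) hee
        · intro h e he hee
          exact h e (by omega) hee
    · rw [dif_neg (by exact_mod_cast hcond)]
      constructor
      · intro _ e he hee
        exfalso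
        have : d * d ≤ e * e := Nat.mul_le_mul he he
        omega
      · intro _; rfl

lemma euler5IsPrime_eq (p : ℕ) : euler5IsPrime (p : Int) = true ↔ p.Prime := by
  unfold euler5IsPrime
  by_cases hp : p < 2
  · rw [if_pos (by exact_mod_cast hp)]
    constructor
    · intro h; exact absurd h (by simp)
    · intro h; exact absurd h.two_le (by omega)
  · have hp2 : 2 ≤ p := by omega
    rw [if_neg (show ¬ ((p : Int) < 2) by exact_mod_cast hp)]
    have h2 : (2 : Int) = ((2 : ℕ) : Int) := by norm_num
    rw [h2, euler5IsPrimeLoop_eq p hp2 (p + 1 - 2) 2 (by omega) le_rfl]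
    rw [Nat.prime_def_le_sqrt]
    constructor
    · intro h
      exact ⟨hp2, fun m hm hms => h m hm (Nat.le_sqrt.mp hms)⟩
    · intro h e he hee
      exact h.2 e he (Nat.le_sqrt.mpr hee)

lemma euler5PowLoop_eq (n p : ℕ) (hp : 2 ≤ p) : ∀ k j : ℕ, 1 ≤ j → p ^ j ≤ n →
    n + 1 - p ^ j ≤ k →
    euler5PowLoop (n : Int) (p : Int) ((p ^ j : ℕ) : Int) = ((p ^ Nat.log p n : ℕ) : Int) := by
  intro k
  induction k with
  | zero => intro j hj hjn hk; omega
  | succ k ih =>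
    intro j hj hjn hk
    have hcast : ((p ^ j : ℕ) : Int) * (p : Int) = ((p ^ (j + 1) : ℕ) : Int) := by
      push_cast [pow_succ]; ring
    have hstep : p ^ j < p ^ (j + 1) := by
      have h1 : 1 ≤ p ^ j := Nat.one_le_pow _ _ (by omega)
      calc p ^ j = p ^ j * 1 := by ring
        _ < p ^ j * p := by exact Nat.mul_lt_mul_of_le_of_lt le_rfl (by omega) (by omega)
        _ = p ^ (j + 1) := by ring
    rw [euler5PowLoop]
    by_cases hnext : p ^ (j + 1) ≤ n
    · rw [dif_pos ⟨by exact_mod_cast hp, by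
        have h1 : 1 ≤ p ^ j := Nat.one_le_pow _ _ (by omega)
        exact_mod_cast h1, by rw [hcast]; exact_mod_cast hnext⟩]
      rw [hcast]
      exact ih (j + 1) (by omega) hnext (by omega)
    · rw [dif_neg (by
        rintro ⟨-, -, habs⟩
        rw [hcast] at habs
        exact hnext (by exact_mod_cast habs))]
      have hlog : Nat.log p n = j := Nat.log_eq_of_pow_le_of_lt_pow hjn (by omega)
      rw [hlog]

def euler5NatB (n : ℕ) : ℕ :=
  (List.range' 2 (n - 1)).foldl (fun r p => if p.Prime then r * p ^ Nat.log p n else r) 1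

lemma euler5_foldB (n : ℕ) (l : List ℕ) : ∀ r : ℕ, (∀ p ∈ l, 2 ≤ p ∧ p ≤ n) →
    (l.map (fun x : ℕ => (x : Int))).foldl
        (fun result p => if euler5IsPrime p then result * euler5PowLoop (n : Int) p p else result)
        (r : Int)
      = ((l.foldl (fun r p => if p.Prime then r * p ^ Nat.log p n else r) r : ℕ) : Int) := by
  induction l with
  | nil => intro r _; simp
  | cons x xs ih =>
    intro r hl
    obtain ⟨hx2, hxn⟩ := hl x (by simp)
    simp only [List.map_cons, List.foldl_cons]
    by_cases hprime : x.Prime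
    · rw [if_pos ((euler5IsPrime_eq x).mpr hprime), if_pos hprime]
      have hpow : euler5PowLoop (n : Int) (x : Int) ((x : Int)) = ((x ^ Nat.log x n : ℕ) : Int) := by
        simpa using euler5PowLoop_eq n x hx2 (n + 1 - x) 1 le_rfl (by simpa using hxn)
          (by simp)
      rw [hpow]
      have hmul : (r : Int) * ((x ^ Nat.log x n : ℕ) : Int)
          = ((r * x ^ Nat.log x n : ℕ) : Int) := by push_cast; ring
      rw [hmul]
      exact ih _ (fun p hp => hl p (by simp [hp]))
    · rw [if_neg (fun hc => hprime ((euler5IsPrime_eq x).mp hc)), if_neg hprime]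
      exact ih _ (fun p hp => hl p (by simp [hp]))

lemma euler5_alt_eq_natB (n : ℕ) : euler5_alt (n : Int) = (euler5NatB n : Int) := by
  unfold euler5_alt euler5NatB
  have hrange : PySem.List.pyRange 2 ((n : Int) + 1) 1
      = (List.range' 2 (n - 1)).map (fun x : ℕ => (x : Int)) := by
    rw [PySem.List.pyRange_one, List.range'_eq_map_range, List.map_map]
    have h1 : ((n : Int) + 1 - 2).toNat = n - 1 := by omega
    rw [h1]
    apply List.map_congr_left
    intro k _
    simp
  rw [hrange]
  exact euler5_foldB n (List.range' 2 (n - 1)) 1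
    (fun p hp => by have := List.mem_range'_1.mp hp; omega)

lemma euler5_foldB_prod (n : ℕ) : ∀ m : ℕ,
    (List.range' 2 m).foldl (fun r p => if p.Prime then r * p ^ Nat.log p n else r) 1
      = ∏ p ∈ (Finset.range (2 + m)).filter Nat.Prime, p ^ Nat.log p n := by
  intro m
  induction m with
  | zero =>
    have h : (Finset.range (2 + 0)).filter Nat.Prime = ∅ := by decide
    simp [h]
  | succ m ih =>
    rw [List.range'_concat, List.foldl_append]
    simp only [List.foldl_cons, List.foldl_nil]
    rw [show 2 + 1 * m = 2 + m from by omega, ih,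
      show 2 + (m + 1) = (2 + m) + 1 from by omega, Finset.range_add_one, Finset.filter_insert]
    by_cases hprime : (2 + m).Prime
    · rw [if_pos hprime, if_pos hprime, Finset.prod_insert (by simp)]
      ring
    · rw [if_neg hprime, if_neg hprime]

lemma euler5NatB_eq_Prod (n : ℕ) : euler5NatB n = euler5Prod n := by
  unfold euler5NatB euler5Prod
  rcases Nat.eq_zero_or_pos n with rfl | hn
  · simp [Nat.primesBelow]
  · rw [euler5_foldB_prod n (n - 1)]
    have h1 : 2 + (n - 1) = n + 1 := by omega
    rw [h1]
    rfl

-- ---- main theorem ----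

lemma euler5_eq_alt (limit : Int) : euler5 limit = euler5_alt limit := by
  rcases (by omega : limit ≤ 0 ∨ 0 < limit) with h | h
  · rw [euler5, euler5_alt,
      PySem.List.pyRange_one_eq_nil (by omega : limit + 1 ≤ 1),
      PySem.List.pyRange_one_eq_nil (by omega : limit + 1 ≤ 2)]
    rfl
  · obtain ⟨n, rfl⟩ : ∃ n : ℕ, limit = (n : Int) :=
      ⟨limit.toNat, (Int.toNat_of_nonneg h.le).symm⟩
    rw [euler5_eq_natA n, euler5_alt_eq_natB n, euler5NatB_eq_Prod n, euler5NatA_eq_Prod n]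

-- ===== VERDICT (by name: the statement is the Claim_ definition above) =====
theorem euler5_spec : Claim_equal_euler5 := by
  intro limit _
  unfold Spec_euler5
  exact euler5_eq_alt limit
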